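-- pv_equiv track=rewrite | github.com/gabriellaec/desoft-analise-exercicios | backup/user_285/ch5_2019_04_02_17_50_52_456603.py | maior_primo_menor_que
-- ===== SOURCE A (Python) =====
-- def maior_primo_menor_que(n):
--     for i in range(1,n):
--         x=0
--         for k in range(1,n):
--             if i%k==0:
--                 x+=1
--         if x<=2:
--             primo=i
--     if primo<=1:
--         primo=-1
--     return primo
-- ===== SOURCE B (Python) =====
-- def maior_primo_menor_que(n):
--     # Scan candidates downward; trial-divide only up to sqrt(i); early exit on first prime.
--     def _is_prime(m):
--         if m < 2:
--             return False
--         d = 2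
--         while d * d <= m:
--             if m % d == 0:
--                 return False
--             d += 1
--         return True
--     for i in range(n - 1, 1, -1):
--         if _is_prime(i):
--             return i
--     return -1
-- ===== Notes on version B (the rewrite author's own statement) =====
-- stated objective: faster
-- what changed: A counts divisors of every i in [1,n) with a full inner scan over [1,n) and keeps the last candidate; B scans downward from n-1, trial-divides each candidate only up to its square root, and returns the first prime found.
-- outside the precondition, e.g. on maior_primo_menor_que(1): A raises UnboundLocalError, B returns -1; on maior_primo_menor_que(-1): A raises UnboundLocalError, B returns -1
-- crash fix: For n <= 1 A raises UnboundLocalError (primo never assigned); B returns -1 (no prime below n). — e.g. on maior_primo_menor_que(1): A raises UnboundLocalError, B returns -1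
import Mathlib
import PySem

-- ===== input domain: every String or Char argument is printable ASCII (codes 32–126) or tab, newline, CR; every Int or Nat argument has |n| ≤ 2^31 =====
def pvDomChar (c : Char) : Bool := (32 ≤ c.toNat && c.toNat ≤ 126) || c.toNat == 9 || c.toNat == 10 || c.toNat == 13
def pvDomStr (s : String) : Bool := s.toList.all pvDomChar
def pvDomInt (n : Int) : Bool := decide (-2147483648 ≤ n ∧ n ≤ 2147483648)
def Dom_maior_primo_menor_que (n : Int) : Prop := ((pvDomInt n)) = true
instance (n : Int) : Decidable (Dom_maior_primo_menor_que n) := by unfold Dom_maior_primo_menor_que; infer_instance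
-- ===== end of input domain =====

-- B rescans candidates downward with trial division up to sqrt and early exit, instead of A's
-- full divisor count of every i in [1,n) with an inner scan over [1,n).

-- ===== PORT A =====
-- inner 'for k in range(1,n)' loop of A: x = number of k in [1,n) with i % k == 0
def pvInnerCount (n i : Int) : Int :=
  (PySem.List.pyRange 1 n 1).foldl (fun x k => if PySem.Int.mod i k == 0 then x + 1 else x) 0

def maior_primo_menor_que (n : Int) : Int :=
  let primo : Option Int :=
    (PySem.List.pyRange 1 n 1).foldl
      (fun primo i => if pvInnerCount n i ≤ 2 then some i else primo) none
  match primo with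
  | some p => if p ≤ 1 then -1 else p
  | none => -1  -- unreachable under Pre_ (Python raises UnboundLocalError for n ≤ 1)

-- ===== PORT B =====
-- the 'while d*d <= m' trial-division loop of B's _is_prime; fuel bounds the iterations
def pvTrial (m : Int) : Nat → Int → Bool
  | 0, _ => true
  | fuel+1, d =>
      if d * d ≤ m then
        (if PySem.Int.mod m d == 0 then false else pvTrial m fuel (d + 1))
      else true

def pvIsPrime (m : Int) : Bool :=
  if m < 2 then false else pvTrial m m.toNat 2

def maior_primo_menor_que_alt (n : Int) : Int :=
  match (PySem.List.pyRange (n - 1) 1 (-1)).findSome?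
          (fun i => if pvIsPrime i then some i else none) with
  | some i => i
  | none => -1

-- ===== PRECONDITION & SPEC =====
-- Pre_ excludes n ≤ 1, where the Python A raises UnboundLocalError ('primo' never assigned).
def Pre_maior_primo_menor_que (n : Int) : Prop := 2 ≤ n
instance (n : Int) : Decidable (Pre_maior_primo_menor_que n) := by unfold Pre_maior_primo_menor_que; infer_instance
def pvWitness_maior_primo_menor_que : Int := 10

-- For n ≤ 1 the Python A raises UnboundLocalError; B returns -1 (no prime below n).
def Raises_maior_primo_menor_que (n : Int) : Prop := n ≤ 1
instance (n : Int) : Decidable (Raises_maior_primo_menor_que n) := by unfold Raises_maior_primo_menor_que; infer_instance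
def pvRaiseWitness_maior_primo_menor_que : Int := 1
def pvRaiseWitnessOut_maior_primo_menor_que : Int := -1

def Spec_maior_primo_menor_que (n : Int) (out : Int) : Prop := out = maior_primo_menor_que_alt n
instance (n : Int) (out : Int) : Decidable (Spec_maior_primo_menor_que n out) := by unfold Spec_maior_primo_menor_que; infer_instance

-- ===== CLAIM (what is proved, stated in full; the proofs are below) =====
def Claim_equal_maior_primo_menor_que : Prop := ∀ (n : Int), Dom_maior_primo_menor_que n → Pre_maior_primo_menor_que n → Spec_maior_primo_menor_que n (maior_primo_menor_que n)
def Claim_raises_maior_primo_menor_que : Prop := (∀ (n : Int), Dom_maior_primo_menor_que n → Raises_maior_primo_menor_que n → ¬ Pre_maior_primo_menor_que n) ∧ (Dom_maior_primo_menor_que (pvRaiseWitness_maior_primo_menor_que) ∧ Raises_maior_primo_menor_que (pvRaiseWitness_maior_primo_menor_que) ∧ maior_primo_menor_que_alt (pvRaiseWitness_maior_primo_menor_que) = pvRaiseWitnessOut_maior_primo_menor_que)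

-- ===== LEMMAS AND PROOFS =====

-- A's 'if x<=2: primo=i' loop keeps the LAST satisfying element: it is find? on the reversed list
lemma pv_foldl_last (P : Int → Prop) [DecidablePred P] (l : List Int) (init : Option Int) :
    l.foldl (fun acc i => if P i then some i else acc) init
      = (l.reverse.find? (fun i => decide (P i))).or init := by
  induction l generalizing init with
  | nil => simp
  | cons a t ih =>
      simp only [List.foldl_cons, List.reverse_cons, List.find?_append, ih]
      cases h : t.reverse.find? (fun i => decide (P i)) with
      | some x => simp
      | none => by_cases hq : P a <;> simp [List.find?, hq]

lemma pv_find?_congr {l : List Int} {p q : Int → Bool} (h : ∀ x ∈ l, p x = q x) :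
    l.find? p = l.find? q := by
  induction l with
  | nil => rfl
  | cons a t ih =>
      have ha := h a (by simp)
      simp only [List.find?, ha]
      cases q a
      · exact ih (fun x hx => h x (by simp [hx]))
      · rfl

-- B's 'if _is_prime(i): return i' loop is find? on the candidate list
lemma pv_findSome?_if (q : Int → Bool) (l : List Int) :
    l.findSome? (fun i => if q i then some i else none) = l.find? q := by
  induction l with
  | nil => rfl
  | cons a t ih =>
      simp only [List.findSome?_cons, List.find?]
      cases q a <;> simp [ih]

-- the trial-division while-loop, characterised (fuel large enough to pass sqrt m)
lemma pv_trial_iff (m : Int) (fuel : Nat) (d : Int) (h2 : 2 ≤ d)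
    (hf : m < (d + fuel) * (d + fuel)) :
    pvTrial m fuel d = true ↔ ∀ e : Int, d ≤ e → e * e ≤ m → ¬ e ∣ m := by
  induction fuel generalizing d with
  | zero =>
      simp only [pvTrial, true_iff]
      intro e hde hem hdvd
      have hdd : d * d ≤ e * e := mul_le_mul hde hde (by omega) (by omega)
      simp only [Nat.cast_zero, add_zero] at hf
      linarith
  | succ fuel ih =>
      simp only [pvTrial]
      split_ifs with hdm hmod
      · -- d*d ≤ m and d ∣ m : loop returns false
        rw [beq_iff_eq, PySem.Int.mod_eq_zero_iff_dvd] at hmod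
        simp only [false_iff, not_forall]
        exact ⟨d, le_rfl, hdm, fun h => h hmod⟩
      · -- d*d ≤ m, d does not divide m : recurse on d+1
        rw [beq_iff_eq, PySem.Int.mod_eq_zero_iff_dvd] at hmod
        have hf' : m < (d + 1 + (fuel : Int)) * (d + 1 + (fuel : Int)) := by
          have : d + 1 + (fuel : Int) = d + ((fuel + 1 : Nat) : Int) := by push_cast; ring
          rw [this]; exact hf
        rw [ih (d + 1) (by omega) hf']
        constructor
        · intro h e hde hem hdvd
          rcases eq_or_lt_of_le hde with heq | hlt
          · exact hmod (heq ▸ hdvd)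
          · exact h e (by omega) hem hdvd
        · intro h e hde hem hdvd
          exact h e (by omega) hem hdvd
      · -- m < d*d : loop exits true, condition vacuous
        simp only [true_iff]
        intro e hde hem hdvd
        have hdd : d * d ≤ e * e := mul_le_mul hde hde (by omega) (by omega)
        omega

lemma pv_isPrime_iff (i : Int) (hi : 2 ≤ i) : pvIsPrime i = true ↔ Nat.Prime i.toNat := by
  have hi0 : (i.toNat : Int) = i := Int.toNat_of_nonneg (by omega)
  rw [pvIsPrime, if_neg (by omega),
      pv_trial_iff i i.toNat 2 le_rfl (by rw [show (2 : Int) + (i.toNat : Int) = 2 + i by rw [hi0]]; nlinarith),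
      Nat.prime_def_le_sqrt]
  constructor
  · intro h
    refine ⟨by omega, fun m h2m hms hdvd => ?_⟩
    refine h (m : Int) (by exact_mod_cast h2m) ?_ ?_
    · have hmm : m * m ≤ i.toNat := Nat.le_sqrt.mp hms
      calc ((m : Int) * m) = ((m * m : Nat) : Int) := by push_cast; ring
        _ ≤ i := by rw [← hi0]; exact_mod_cast hmm
    · rw [← hi0]; exact_mod_cast hdvd
  · rintro ⟨-, h⟩ e h2e hee hdvd
    have he0 : (e.toNat : Int) = e := Int.toNat_of_nonneg (by omega)
    refine h e.toNat (by omega) (Nat.le_sqrt.mpr ?_) ?_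
    · have : ((e.toNat * e.toNat : Nat) : Int) ≤ ((i.toNat : Nat) : Int) := by
        push_cast [he0, hi0]; exact hee
      exact_mod_cast this
    · have : (e.toNat : Int) ∣ (i.toNat : Int) := by rw [he0, hi0]; exact hdvd
      exact_mod_cast this

lemma pv_count_eq (n i : Int) :
    pvInnerCount n i
      = ((PySem.List.pyRange 1 n 1).countP (fun k => PySem.Int.mod i k == 0) : Int) := by
  rw [pvInnerCount, PySem.List.foldl_if_add_one]; simp

-- if all positive divisors of i below n are 1 or i, the divisor count is at most 2
lemma pv_count_le_two (n i : Int) (_h1 : 1 ≤ i) (_hin : i < n)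
    (hdiv : ∀ k : Int, 1 ≤ k → k ∣ i → k = 1 ∨ k = i) : pvInnerCount n i ≤ 2 := by
  rw [pv_count_eq, List.countP_eq_length_filter]
  set l := (PySem.List.pyRange 1 n 1).filter (fun k => PySem.Int.mod i k == 0) with hl
  have hnd : l.Nodup := (PySem.List.nodup_pyRange_one 1 n).filter _
  have hsub : l.toFinset ⊆ ({1, i} : Finset Int) := by
    intro x hx
    rw [List.mem_toFinset, hl, List.mem_filter, PySem.List.mem_pyRange_one,
        beq_iff_eq, PySem.Int.mod_eq_zero_iff_dvd] at hx
    rcases hdiv x hx.1.1 hx.2 with h | h <;> simp [h]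
  have hcard : l.toFinset.card ≤ 2 :=
    le_trans (Finset.card_le_card hsub) (le_trans (Finset.card_insert_le _ _) (by simp))
  rw [List.toFinset_card_of_nodup hnd] at hcard
  exact_mod_cast hcard

-- if i has a nontrivial divisor m, then 1, m, i are three divisors below n: count at least 3
lemma pv_count_ge_three (n i : Int) (h2 : 2 ≤ i) (hin : i < n) (m : Nat)
    (h2m : 2 ≤ m) (hmi : (m : Int) < i) (hdvd : (m : Int) ∣ i) : 3 ≤ pvInnerCount n i := by
  rw [pv_count_eq, List.countP_eq_length_filter]
  set l := (PySem.List.pyRange 1 n 1).filter (fun k => PySem.Int.mod i k == 0) with hl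
  have hmem : ∀ x : Int, 1 ≤ x → x < n → x ∣ i → x ∈ l := by
    intro x hx1 hxn hxd
    rw [hl, List.mem_filter, PySem.List.mem_pyRange_one, beq_iff_eq,
        PySem.Int.mod_eq_zero_iff_dvd]
    exact ⟨⟨hx1, hxn⟩, hxd⟩
  have hsub : ({1, (m : Int), i} : Finset Int) ⊆ l.toFinset := by
    rw [Finset.insert_subset_iff, Finset.insert_subset_iff, Finset.singleton_subset_iff]
    refine ⟨?_, ?_, ?_⟩ <;> rw [List.mem_toFinset]
    · exact hmem 1 le_rfl (by omega) (one_dvd i)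
    · exact hmem (m : Int) (by omega) (by omega) hdvd
    · exact hmem i (by omega) hin dvd_rfl
  have hc3 : ({1, (m : Int), i} : Finset Int).card = 3 := by
    rw [Finset.card_insert_of_notMem (by simp; omega),
        Finset.card_insert_of_notMem (by simp; omega), Finset.card_singleton]
  have := le_trans (le_of_eq hc3.symm) (Finset.card_le_card hsub)
  have := le_trans this l.toFinset_card_le
  exact_mod_cast this

-- the crux: A's divisor-count test agrees with B's trial division on every candidate 2 ≤ i < n
lemma pv_crux (n i : Int) (h2 : 2 ≤ i) (hin : i < n) :
    (decide (pvInnerCount n i ≤ 2)) = pvIsPrime i := by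
  have hi0 : (i.toNat : Int) = i := Int.toNat_of_nonneg (by omega)
  by_cases hp : pvIsPrime i = true
  · rw [hp, decide_eq_true_eq]
    have hprime : Nat.Prime i.toNat := (pv_isPrime_iff i h2).mp hp
    refine pv_count_le_two n i (by omega) hin (fun k hk1 hkd => ?_)
    have hk0 : (k.toNat : Int) = k := Int.toNat_of_nonneg (by omega)
    have : k.toNat ∣ i.toNat := by
      have : (k.toNat : Int) ∣ (i.toNat : Int) := by rw [hk0, hi0]; exact hkd
      exact_mod_cast this
    rcases hprime.eq_one_or_self_of_dvd k.toNat this with h | h <;> [left; right] <;> omega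
  · rw [Bool.eq_false_iff.mpr hp, decide_eq_false_iff_not, not_le]
    have hnp : ¬ Nat.Prime i.toNat := fun h => hp ((pv_isPrime_iff i h2).mpr h)
    rw [Nat.prime_def_lt'] at hnp
    push Not at hnp
    rcases hnp (by omega) with ⟨m, h2m, hmi, hmd⟩
    have hdvd : (m : Int) ∣ i := by
      have : (m : Int) ∣ (i.toNat : Int) := by exact_mod_cast hmd
      rwa [hi0] at this
    have := pv_count_ge_three n i h2 hin m h2m (by omega) hdvd
    omega

-- ===== VERDICT (by name: the statement is the Claim_ definition above) =====
theorem maior_primo_menor_que_spec : Claim_equal_maior_primo_menor_que := by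
  intro n _ hpre
  unfold Pre_maior_primo_menor_que at hpre
  unfold Spec_maior_primo_menor_que
  rw [maior_primo_menor_que, maior_primo_menor_que_alt, pv_findSome?_if,
      pv_foldl_last (fun i => pvInnerCount n i ≤ 2)]
  have hsplit : PySem.List.pyRange 1 n 1 = [1] ++ PySem.List.pyRange 2 n 1 := by
    have h12 : PySem.List.pyRange 1 2 1 = [1] := by decide
    rw [PySem.List.pyRange_one_append 1 2 n (by omega) (by omega), h12]
  have hB : PySem.List.pyRange (n - 1) 1 (-1) = (PySem.List.pyRange 2 n 1).reverse := by
    rw [PySem.List.pyRange_neg_one_eq_reverse]; norm_num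
  rw [hsplit, hB]
  simp only [List.reverse_append, List.reverse_cons, List.reverse_nil, List.nil_append,
    List.find?_append]
  have hcong : (PySem.List.pyRange 2 n 1).reverse.find?
        (fun i => decide (pvInnerCount n i ≤ 2))
      = (PySem.List.pyRange 2 n 1).reverse.find? pvIsPrime := by
    refine pv_find?_congr (fun x hx => ?_)
    rw [List.mem_reverse, PySem.List.mem_pyRange_one] at hx
    exact pv_crux n x hx.1 hx.2
  rw [hcong]
  have h1 : ([1] : List Int).find? (fun i => decide (pvInnerCount n i ≤ 2)) = some 1 := by
    have := pv_count_le_two n 1 le_rfl (by omega)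
      (fun k hk1 hkd => Or.inl (by have := Int.le_of_dvd (by omega) hkd; omega))
    simp [List.find?, this]
  rw [h1]
  cases h : (PySem.List.pyRange 2 n 1).reverse.find? pvIsPrime with
  | none => simp
  | some p =>
      have hp : p ∈ (PySem.List.pyRange 2 n 1).reverse := List.mem_of_find?_eq_some h
      rw [List.mem_reverse, PySem.List.mem_pyRange_one] at hp
      simp only [Option.or]
      rw [if_neg (by omega)]

def maior_primo_menor_que_raises : Claim_raises_maior_primo_menor_que := by
  unfold Claim_raises_maior_primo_menor_que
  exact ⟨fun n _ h => by unfold Raises_maior_primo_menor_que Pre_maior_primo_menor_que at *; omega, by decide⟩
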